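-- pv_equiv track=rewrite | github.com/mortlach/Rune-Decrypting-Examples | Basic_GeneticAlgo_Mono/gematria.py | translate_to_gematria
-- ===== SOURCE A (Python) =====
-- latin2rune_dict = {'F': 'ᚠ', 'U': 'ᚢ', 'TH': 'ᚦ', 'O': 'ᚩ', 'R': 'ᚱ', 'C': 'ᚳ', 'G': 'ᚷ', 'W': 'ᚹ', 'H': 'ᚻ', 'N': 'ᚾ', 'I': 'ᛁ',
--      'J': 'ᛂ', 'EO': 'ᛇ', 'P': 'ᛈ', 'X': 'ᛉ', 'S': 'ᛋ', 'T': 'ᛏ', 'B': 'ᛒ', 'E': 'ᛖ', 'M': 'ᛗ', 'L': 'ᛚ', 'ING': 'ᛝ',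
--      'OE': 'ᛟ', 'D': 'ᛞ', 'A': 'ᚪ', 'AE': 'ᚫ', 'Y': 'ᚣ', 'IA': 'ᛡ', 'EA': 'ᛠ', 'IO': 'ᛡ', 'K': 'ᚳ', 'NG': 'ᛝ', 'Z': 'ᛋ',
--      'Q': 'ᚳ', 'V': 'ᚢ'}
--
-- BIGRM  = ['TH', 'EO', 'NG', 'OE', 'AE', 'IA', 'IO', 'EA']
--
-- TRGRAM = 'ING'
--
-- def latin2rune(char):
--     return latin2rune_dict.get(char, char)
--
-- def translate_to_gematria(word):
--     '''
--         convert word standard english to runes (Latin)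
--     '''
--     res = []
--     skip = 0
--     WORD = word.upper().replace("QU", "KW")
--     WORD = WORD.replace("Q", "K")
--     for i, val in enumerate(WORD):
--         if skip:
--             skip -= 1
--             continue
--         if WORD[i:i + 3] == TRGRAM:
--             res.append(TRGRAM)
--             skip += 2
--             continue
--         if WORD[i:i + 2] in BIGRM:
--             res.append(WORD[i:i + 2])
--             skip += 1
--             continue
--         if WORD[i] == '\'':
--             res.append('\'')
--             continue
--         if WORD[i] == '"':
--             res.append('"')
--             continue
--         res.append(val)
--     return ''.join([latin2rune(r) for r in res])
-- ===== SOURCE B (Python) =====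
-- import re
--
-- latin2rune_dict = {'F': 'ᚠ', 'U': 'ᚢ', 'TH': 'ᚦ', 'O': 'ᚩ', 'R': 'ᚱ', 'C': 'ᚳ', 'G': 'ᚷ', 'W': 'ᚹ', 'H': 'ᚻ', 'N': 'ᚾ', 'I': 'ᛁ',
--      'J': 'ᛂ', 'EO': 'ᛇ', 'P': 'ᛈ', 'X': 'ᛉ', 'S': 'ᛋ', 'T': 'ᛏ', 'B': 'ᛒ', 'E': 'ᛖ', 'M': 'ᛗ', 'L': 'ᛚ', 'ING': 'ᛝ',
--      'OE': 'ᛟ', 'D': 'ᛞ', 'A': 'ᚪ', 'AE': 'ᚫ', 'Y': 'ᚣ', 'IA': 'ᛡ', 'EA': 'ᛠ', 'IO': 'ᛡ', 'K': 'ᚳ', 'NG': 'ᛝ', 'Z': 'ᛋ',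
--      'Q': 'ᚳ', 'V': 'ᚢ'}
--
-- # ordered alternation: the trigram, then the bigrams, then any single character
-- _TOKEN = re.compile('ING|TH|EO|NG|OE|AE|IA|IO|EA|.', re.S)
--
-- def translate_to_gematria(word):
--     '''convert word standard english to runes (Latin)'''
--     WORD = word.upper().replace("QU", "KW").replace("Q", "K")
--     return _TOKEN.sub(lambda m: latin2rune_dict.get(m.group(0), m.group(0)), WORD)
-- ===== Notes on version B (the rewrite author's own statement) =====
-- stated objective: idiomatic
-- what changed: Replaces the explicit enumerate loop with a skip counter, a token accumulator and a final map/join by a single regex substitution whose pattern is an ordered alternation of the trigram, the eight bigrams and a single-character catch-all, tokenizing and mapping each match through the dict in one step.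
import Mathlib
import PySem

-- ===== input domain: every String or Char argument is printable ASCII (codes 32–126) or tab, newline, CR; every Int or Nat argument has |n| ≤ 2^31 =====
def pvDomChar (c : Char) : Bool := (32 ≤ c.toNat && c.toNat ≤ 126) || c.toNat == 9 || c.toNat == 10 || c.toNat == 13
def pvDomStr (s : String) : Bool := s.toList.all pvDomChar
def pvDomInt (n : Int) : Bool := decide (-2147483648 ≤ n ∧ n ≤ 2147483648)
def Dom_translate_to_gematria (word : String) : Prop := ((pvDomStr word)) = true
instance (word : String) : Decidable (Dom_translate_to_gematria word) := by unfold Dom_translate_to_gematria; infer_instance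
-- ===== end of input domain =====

-- B replaces A's index/skip loop (token list built with a skip counter, mapped and joined at the end)
-- by a single regex substitution over an ordered alternation of the trigram, the bigrams, then any
-- single character (idiomatic; same cost).

-- ===== PORT A =====
def latin2rune_dict : PySem.Dict String String :=
  PySem.Dict.ofList [("F","ᚠ"),("U","ᚢ"),("TH","ᚦ"),("O","ᚩ"),("R","ᚱ"),("C","ᚳ"),("G","ᚷ"),("W","ᚹ"),
    ("H","ᚻ"),("N","ᚾ"),("I","ᛁ"),("J","ᛂ"),("EO","ᛇ"),("P","ᛈ"),("X","ᛉ"),("S","ᛋ"),("T","ᛏ"),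
    ("B","ᛒ"),("E","ᛖ"),("M","ᛗ"),("L","ᛚ"),("ING","ᛝ"),("OE","ᛟ"),("D","ᛞ"),("A","ᚪ"),("AE","ᚫ"),
    ("Y","ᚣ"),("IA","ᛡ"),("EA","ᛠ"),("IO","ᛡ"),("K","ᚳ"),("NG","ᛝ"),("Z","ᛋ"),("Q","ᚳ"),("V","ᚢ")]

def BIGRM : List String := ["TH","EO","NG","OE","AE","IA","IO","EA"]
def TRGRAM : String := "ING"

def latin2rune (char : String) : String := PySem.Dict.getD latin2rune_dict char char

-- the for-loop of A over enumerate(WORD), state (res, skip); WORD[i] is ported as `val`,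
-- which is exact because enumerate pairs each index i with WORD[i]
def aLoop (W : List Char) : List (Int × Char) → List String → Int → List String
  | [], res, _ => res
  | (i, val) :: rest, res, skip =>
    if skip ≠ 0 then aLoop W rest res (skip - 1)
    else if PySem.List.slice W (some i) (some (i + 3)) = TRGRAM.toList then
      aLoop W rest (res ++ [TRGRAM]) (skip + 2)
    else if String.ofList (PySem.List.slice W (some i) (some (i + 2))) ∈ BIGRM then
      aLoop W rest (res ++ [String.ofList (PySem.List.slice W (some i) (some (i + 2)))]) (skip + 1)
    else if val = '\'' then aLoop W rest (res ++ ["'"]) skip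
    else if val = '"' then aLoop W rest (res ++ ["\""]) skip
    else aLoop W rest (res ++ [String.ofList [val]]) skip

def translate_to_gematria (word : String) : String :=
  let WORD := PySem.Str.replace (PySem.Str.replace (PySem.Str.upper word) "QU" "KW") "Q" "K"
  let res := aLoop WORD.toList (PySem.List.enumerate WORD.toList) [] 0
  PySem.Str.join "" (res.map latin2rune)

-- ===== PORT B =====
-- hand port (exact) of the compiled regex alternation (trigram | bigrams | any char, re.S) used by re.sub:
-- at each position the alternatives are tried left to right, '.' matches any one character,
-- and each match is replaced by latin2rune_dict.get(tok, tok)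
def b_tokens : List String := ["ING","TH","EO","NG","OE","AE","IA","IO","EA"]

def b_sub : (cs : List Char) → List Char
  | [] => []
  | c :: rest =>
    match b_tokens.find? (fun t => t.toList.isPrefixOf (c :: rest)) with
    | some t => (PySem.Dict.getD latin2rune_dict t t).toList ++ b_sub (rest.drop (t.toList.length - 1))
    | none => (PySem.Dict.getD latin2rune_dict (String.ofList [c]) (String.ofList [c])).toList ++ b_sub rest
termination_by cs => cs.length
decreasing_by all_goals simp

def translate_to_gematria_alt (word : String) : String :=
  let WORD := PySem.Str.replace (PySem.Str.replace (PySem.Str.upper word) "QU" "KW") "Q" "K"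
  String.ofList (b_sub WORD.toList)

-- ===== PRECONDITION & SPEC =====
def Spec_translate_to_gematria (word : String) (out : String) : Prop := out = translate_to_gematria_alt word
instance (word : String) (out : String) : Decidable (Spec_translate_to_gematria word out) := by unfold Spec_translate_to_gematria; infer_instance

-- ===== CLAIM (what is proved, stated in full; the proofs are below) =====
def Claim_equal_translate_to_gematria : Prop := ∀ (word : String), Dom_translate_to_gematria word → Spec_translate_to_gematria word (translate_to_gematria word)

-- ===== LEMMAS AND PROOFS =====

-- canonical greedy token list both loops produce (3-char, then 2-char, then 1-char)
def toks : (cs : List Char) → List String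
  | [] => []
  | c :: rest =>
    if (c :: rest).take 3 = TRGRAM.toList then TRGRAM :: toks (rest.drop 2)
    else if String.ofList ((c :: rest).take 2) ∈ BIGRM then String.ofList ((c :: rest).take 2) :: toks (rest.drop 1)
    else String.ofList [c] :: toks rest
termination_by cs => cs.length
decreasing_by all_goals simp

lemma singleton_not_mem_bigrm (c : Char) : String.ofList [c] ∉ BIGRM := by
  intro h
  simp only [BIGRM, List.mem_cons, List.not_mem_nil, or_false] at h
  rcases h with h|h|h|h|h|h|h|h <;> (have := congrArg String.toList h; simp at this)

lemma find?_eq_of_bigram (c c2 : Char) (t : List Char)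
    (h2 : String.ofList [c, c2] ∈ BIGRM) :
    b_tokens.find? (fun tk => tk.toList.isPrefixOf (c :: c2 :: t)) = some (String.ofList [c, c2]) := by
  simp only [BIGRM, List.mem_cons, List.not_mem_nil, or_false] at h2
  rcases h2 with h|h|h|h|h|h|h|h <;>
    (have hc := congrArg String.toList h; simp at hc; obtain ⟨hc1, hc2⟩ := hc; subst hc1; subst hc2;
     rw [h]; simp [b_tokens, List.find?, List.isPrefixOf])

lemma tlING : "ING".toList = ['I','N','G'] := by decide
lemma tlTH : "TH".toList = ['T','H'] := by decide
lemma tlEO : "EO".toList = ['E','O'] := by decide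
lemma tlNG : "NG".toList = ['N','G'] := by decide
lemma tlOE : "OE".toList = ['O','E'] := by decide
lemma tlAE : "AE".toList = ['A','E'] := by decide
lemma tlIA : "IA".toList = ['I','A'] := by decide
lemma tlIO : "IO".toList = ['I','O'] := by decide
lemma tlEA : "EA".toList = ['E','A'] := by decide

lemma prefix_pair {a b c c2 : Char} {t : List Char}
    (hp : ([a, b] : List Char).isPrefixOf (c :: c2 :: t) = true) : c = a ∧ c2 = b := by
  rw [List.isPrefixOf_iff_prefix] at hp
  rcases hp with ⟨t', ht⟩
  injection ht with h1 ht
  injection ht with h2 _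
  exact ⟨h1.symm, h2.symm⟩

lemma prefix_triple {a b d c c2 : Char} {t : List Char}
    (hp : ([a, b, d] : List Char).isPrefixOf (c :: c2 :: t) = true) :
    c = a ∧ c2 = b ∧ ∃ t', t = d :: t' := by
  rw [List.isPrefixOf_iff_prefix] at hp
  rcases hp with ⟨t', ht⟩
  injection ht with h1 ht
  injection ht with h2 ht
  exact ⟨h1.symm, h2.symm, t', ht.symm⟩

lemma find?_eq_none_of (c : Char) (rest : List Char)
    (h3 : ¬ (c :: rest).take 3 = TRGRAM.toList)
    (h2 : String.ofList ((c :: rest).take 2) ∉ BIGRM) :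
    b_tokens.find? (fun tk => tk.toList.isPrefixOf (c :: rest)) = none := by
  rcases rest with _|⟨c2, t⟩
  · simp [b_tokens, List.find?, List.isPrefixOf]
  · rw [List.find?_eq_none]
    intro tk htk
    simp only [b_tokens, List.mem_cons, List.not_mem_nil, or_false] at htk
    rcases htk with h|h|h|h|h|h|h|h|h <;> subst h <;>
      simp only [tlING, tlTH, tlEO, tlNG, tlOE, tlAE, tlIA, tlIO, tlEA] <;> intro hp
    · obtain ⟨h1, h2', t', rfl⟩ := prefix_triple hp
      exact h3 (by simp [h1, h2', TRGRAM, tlING])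
    all_goals
      (obtain ⟨h1, h2'⟩ := prefix_pair hp;
       apply h2; rw [show (c :: c2 :: t).take 2 = [c, c2] from rfl, h1, h2']; decide)

lemma b_sub_spec : ∀ (s : List Char), b_sub s = ((toks s).map (fun t => (latin2rune t).toList)).flatten := by
  intro s
  induction s using toks.induct with
  | case1 => simp [b_sub, toks]
  | case2 c rest h3 ih =>
    rcases rest with _|⟨c2, _|⟨c3, t⟩⟩ <;> simp [TRGRAM] at h3
    obtain ⟨hc, hc2, hc3⟩ := h3; subst hc; subst hc2; subst hc3
    rw [toks]
    rw [b_sub]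
    simp [b_tokens, List.isPrefixOf, latin2rune, TRGRAM] at ih ⊢
    exact ih
  | case3 c rest h3 h2 ih =>
    rcases rest with _|⟨c2, t⟩
    · exact absurd h2 (by simpa using singleton_not_mem_bigrm c)
    · rw [toks, if_neg h3, if_pos h2, b_sub]
      rw [show String.ofList ((c :: c2 :: t).take 2) = String.ofList [c, c2] from rfl] at h2 ⊢
      rw [find?_eq_of_bigram c c2 t h2]
      simp [latin2rune] at ih ⊢
      exact ih
  | case4 c rest h3 h2 ih =>
    rw [toks, if_neg h3, if_neg h2, b_sub, find?_eq_none_of c rest h3 h2]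
    simp [latin2rune] at ih ⊢
    exact ih

lemma aLoop_spec (W : List Char) (s : List Char) : ∀ (i : Nat) (res : List String), W.drop i = s →
    aLoop W (PySem.List.enumerate s (i : Int)) res 0 = res ++ toks s := by
  induction s using toks.induct with
  | case1 => intro i res h; simp [aLoop, toks, PySem.List.enumerate]
  | case2 c rest h3 ih =>
    intro i res hdrop
    have hs3 : PySem.List.slice W (some (i : Int)) (some ((i : Int) + 3)) = (c :: rest).take 3 := by
      have := PySem.List.slice_natCast_add W i 3
      rw [← hdrop]; exact_mod_cast this
    rcases rest with _|⟨c2, _|⟨c3, t⟩⟩ <;> simp [TRGRAM] at h3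
    obtain ⟨hc, hc2, hc3⟩ := h3; subst hc; subst hc2; subst hc3
    have hd : W.drop (i + 3) = t := by
      have h := congrArg (List.drop 3) hdrop
      rw [List.drop_drop] at h
      simpa [Nat.add_comm] using h
    rw [PySem.List.enumerate_cons, PySem.List.enumerate_cons, PySem.List.enumerate_cons]
    rw [aLoop, if_neg (by norm_num), if_pos (by rw [hs3]; rfl)]
    rw [aLoop, if_pos (by norm_num)]
    rw [aLoop, if_pos (by norm_num)]
    have hih := ih (i + 3) (res ++ [TRGRAM]) (by simpa using hd)
    rw [toks, if_pos (show ('I' :: 'N' :: 'G' :: t).take 3 = TRGRAM.toList from rfl)]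
    have hcast : ((i : Int) + 1 + 1 + 1) = (((i + 3 : Nat)) : Int) := by push_cast; ring
    rw [show List.drop 2 ('N' :: 'G' :: t) = t from rfl] at hih ⊢
    rw [hcast]
    simpa using hih
  | case3 c rest h3 h2 ih =>
    intro i res hdrop
    have hs3 : PySem.List.slice W (some (i : Int)) (some ((i : Int) + 3)) = (c :: rest).take 3 := by
      have := PySem.List.slice_natCast_add W i 3
      rw [← hdrop]; exact_mod_cast this
    have hs2 : PySem.List.slice W (some (i : Int)) (some ((i : Int) + 2)) = (c :: rest).take 2 := by
      have := PySem.List.slice_natCast_add W i 2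
      rw [← hdrop]; exact_mod_cast this
    rcases rest with _|⟨c2, t⟩
    · exact absurd h2 (by simpa using singleton_not_mem_bigrm c)
    have hd : W.drop (i + 2) = t := by
      have h := congrArg (List.drop 2) hdrop
      rw [List.drop_drop] at h
      simpa [Nat.add_comm] using h
    rw [PySem.List.enumerate_cons, PySem.List.enumerate_cons]
    rw [aLoop, if_neg (by norm_num), if_neg (by rw [hs3]; exact h3), if_pos (by rw [hs2]; exact h2)]
    rw [aLoop, if_pos (by norm_num)]
    have hih := ih (i + 2) (res ++ [String.ofList ((c :: c2 :: t).take 2)]) (by simpa using hd)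
    rw [toks, if_neg h3, if_pos h2]
    have hcast : ((i : Int) + 1 + 1) = (((i + 2 : Nat)) : Int) := by push_cast; ring
    rw [show List.drop 1 (c2 :: t) = t from rfl] at hih ⊢
    rw [hs2, hcast]
    simpa using hih
  | case4 c rest h3 h2 ih =>
    intro i res hdrop
    have hs3 : PySem.List.slice W (some (i : Int)) (some ((i : Int) + 3)) = (c :: rest).take 3 := by
      have := PySem.List.slice_natCast_add W i 3
      rw [← hdrop]; exact_mod_cast this
    have hs2 : PySem.List.slice W (some (i : Int)) (some ((i : Int) + 2)) = (c :: rest).take 2 := by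
      have := PySem.List.slice_natCast_add W i 2
      rw [← hdrop]; exact_mod_cast this
    have hd : W.drop (i + 1) = rest := by
      have h := congrArg (List.drop 1) hdrop
      rw [List.drop_drop] at h
      simpa [Nat.add_comm] using h
    rw [PySem.List.enumerate_cons]
    rw [aLoop, if_neg (by norm_num), if_neg (by rw [hs3]; exact h3), if_neg (by rw [hs2]; exact h2)]
    rw [toks, if_neg h3, if_neg h2]
    have hcast : ((i : Int) + 1) = (((i + 1 : Nat)) : Int) := by push_cast; ring
    by_cases hq : c = '\''
    · rw [if_pos hq]
      have hih := ih (i + 1) (res ++ ["'"]) hd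
      rw [hcast]
      subst hq
      simpa using hih
    rw [if_neg hq]
    by_cases hq2 : c = '"'
    · rw [if_pos hq2]
      have hih := ih (i + 1) (res ++ ["\""]) hd
      rw [hcast]
      subst hq2
      simpa using hih
    rw [if_neg hq2]
    have hih := ih (i + 1) (res ++ [String.ofList [c]]) hd
    rw [hcast]
    simpa using hih

lemma chars_join_nil (l : List (List Char)) : PySem.Chars.join [] l = l.flatten := by
  show List.intercalate [] l = l.flatten
  induction l with
  | nil => rfl
  | cons a t ih =>
    cases t with
    | nil => simp [List.intercalate]
    | cons b u => simp_all [List.intercalate, List.intersperse]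

lemma ports_core (w : String) :
    PySem.Str.join "" ((aLoop w.toList (PySem.List.enumerate w.toList) [] 0).map latin2rune) =
      String.ofList (b_sub w.toList) := by
  apply String.toList_inj.mp
  have hA := aLoop_spec w.toList w.toList 0 [] (by simp)
  simp only [Nat.cast_zero, List.nil_append] at hA
  rw [hA, b_sub_spec, PySem.Str.toList_join]
  simp [chars_join_nil, show "".toList = [] from rfl]
  rfl

-- ===== VERDICT (by name: the statement is the Claim_ definition above) =====
theorem translate_to_gematria_spec : Claim_equal_translate_to_gematria := by
  intro word _
  show translate_to_gematria word = translate_to_gematria_alt word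
  unfold translate_to_gematria translate_to_gematria_alt
  exact ports_core _
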